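-- pv_equiv track=rewrite | github.com/seanwangtech/leetcode-practice | 202503/20250320-3108. Minimum Cost Walk in Weighted Graph/idea4.py | costOf
-- ===== SOURCE A (Python) =====
-- def costOf(s, edgesMap:dict):
--     cost = ~0
--     visted = set()
--     stack = [s]
--     while stack:
--         node = stack.pop()
--         if(node in visted):
--             continue
--         visted.add(node)
--         for c,w in edgesMap.get(node,[]):
--             stack.append(c)
--             cost &= w
--     return cost, visted
-- ===== SOURCE B (Python) =====
-- def costOf(s, edgesMap: dict):
--     # Pass 1: weight-blind DFS collecting the connected component of s.
--     visted = set()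
--     stack = [s]
--     while stack:
--         node = stack.pop()
--         if node not in visted:
--             visted.add(node)
--             stack.extend(c for c, _ in edgesMap.get(node, []))
--     # Pass 2: AND together the weights of every edge of every visited node.
--     cost = ~0
--     for node in visted:
--         for _, w in edgesMap.get(node, []):
--             cost &= w
--     return cost, visted
-- ===== Notes on version B (the rewrite author's own statement) =====
-- stated objective: alternative
-- what changed: B splits A's single interleaved loop into two independent passes: a weight-blind DFS that collects the visited component, then a separate fold that ANDs the edge weights of every visited node.
import Mathlib
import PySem

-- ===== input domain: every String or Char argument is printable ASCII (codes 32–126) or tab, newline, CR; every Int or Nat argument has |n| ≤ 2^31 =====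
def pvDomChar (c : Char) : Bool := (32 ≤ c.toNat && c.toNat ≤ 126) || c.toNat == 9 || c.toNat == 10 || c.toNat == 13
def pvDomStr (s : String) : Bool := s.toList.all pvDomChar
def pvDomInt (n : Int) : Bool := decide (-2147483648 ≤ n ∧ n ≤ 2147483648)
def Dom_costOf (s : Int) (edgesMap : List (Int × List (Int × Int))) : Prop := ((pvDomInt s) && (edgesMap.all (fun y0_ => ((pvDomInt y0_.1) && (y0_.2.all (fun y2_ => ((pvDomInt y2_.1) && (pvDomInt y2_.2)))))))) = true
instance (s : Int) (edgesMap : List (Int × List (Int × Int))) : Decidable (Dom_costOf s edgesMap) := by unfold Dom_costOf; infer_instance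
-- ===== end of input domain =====

-- B replaces A's single interleaved DFS (cost ANDed while traversing) by two independent
-- passes: a weight-blind DFS collecting the visited set, then a fold ANDing the weights
-- of every edge of every visited node (alternative decomposition, same cost).

-- ===== PORT A =====
-- the 'for c,w in edgesMap.get(node,[])' body: pushes c (Python appends to the end /
-- pops from the end; the stack is kept top-first here) and ANDs w into cost, in one fold
def costOfInner (edges : List (Int × Int)) (st : List Int) (cost : Int) : List Int × Int :=
  edges.foldl (fun p e => (e.1 :: p.1, PySem.Int.band p.2 e.2)) (st, cost)

-- the while loop; fuel is a totality guard only (1 + total edge count bounds the pops)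
def costOfLoop (edgesMap : List (Int × List (Int × Int))) :
    Nat → List Int → PySem.Set Int → Int → Int × List Int
  | 0, _, vis, cost => (cost, vis)
  | _ + 1, [], vis, cost => (cost, vis)
  | fuel + 1, node :: rest, vis, cost =>
    if PySem.Set.contains vis node then costOfLoop edgesMap fuel rest vis cost
    else
      let p := costOfInner ((List.lookup node edgesMap).getD []) rest cost
      costOfLoop edgesMap fuel p.1 (PySem.Set.add vis node) p.2

def costOf (s : Int) (edgesMap : List (Int × List (Int × Int))) : Int × List Int :=
  costOfLoop edgesMap (1 + edgesMap.foldl (fun a p => a + p.2.length) 0) [s] PySem.Set.empty (-1)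

-- ===== PORT B =====
-- pass 1: weight-blind DFS over the same stack discipline (same fuel guard as A's loop)
def visitLoop (edgesMap : List (Int × List (Int × Int))) :
    Nat → List Int → PySem.Set Int → PySem.Set Int
  | 0, _, vis => vis
  | _ + 1, [], vis => vis
  | fuel + 1, node :: rest, vis =>
    if ¬ PySem.Set.contains vis node then
      visitLoop edgesMap fuel
        (((List.lookup node edgesMap).getD []).foldl (fun st e => e.1 :: st) rest)
        (PySem.Set.add vis node)
    else visitLoop edgesMap fuel rest vis

-- pass 2: AND the weights of all edges of one node into cost
def nodeCost (edgesMap : List (Int × List (Int × Int))) (cost : Int) (node : Int) : Int :=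
  ((List.lookup node edgesMap).getD []).foldl (fun c e => PySem.Int.band c e.2) cost

def costOf_alt (s : Int) (edgesMap : List (Int × List (Int × Int))) : Int × List Int :=
  let vis := visitLoop edgesMap (1 + edgesMap.foldl (fun a p => a + p.2.length) 0) [s] PySem.Set.empty
  (vis.foldl (nodeCost edgesMap) (-1), vis)

-- ===== PRECONDITION & SPEC =====
def Spec_costOf (s : Int) (edgesMap : List (Int × List (Int × Int))) (out : Int × List Int) : Prop := out = costOf_alt s edgesMap
instance (s : Int) (edgesMap : List (Int × List (Int × Int))) (out : Int × List Int) : Decidable (Spec_costOf s edgesMap out) := by unfold Spec_costOf; infer_instance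

-- ===== CLAIM (what is proved, stated in full; the proofs are below) =====
def Claim_equal_costOf : Prop := ∀ (s : Int) (edgesMap : List (Int × List (Int × Int))), Dom_costOf s edgesMap → Spec_costOf s edgesMap (costOf s edgesMap)

-- ===== LEMMAS AND PROOFS =====

-- A's fused inner fold, split into its stack component and its cost component
theorem costOfInner_eq (edges : List (Int × Int)) (st : List Int) (cost : Int) :
    costOfInner edges st cost =
      (edges.foldl (fun st e => e.1 :: st) st, edges.foldl (fun c e => PySem.Int.band c e.2) cost) := by
  induction edges generalizing st cost with
  | nil => rfl
  | cons e es ih => simp only [costOfInner, List.foldl_cons] at ih ⊢; exact ih _ _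

-- loop invariant: A's fused loop visits the same nodes (appended after vis) as B's
-- weight-blind loop, and its cost is the fold of nodeCost over the newly visited nodes
theorem loop_eq (edgesMap : List (Int × List (Int × Int))) :
    ∀ (fuel : Nat) (stack : List Int) (vis : PySem.Set Int) (cost : Int),
      ∃ Δ : List Int,
        visitLoop edgesMap fuel stack vis = vis ++ Δ ∧
        costOfLoop edgesMap fuel stack vis cost = (Δ.foldl (nodeCost edgesMap) cost, vis ++ Δ) := by
  intro fuel
  induction fuel with
  | zero => intro stack vis cost; exact ⟨[], by simp [visitLoop], by simp [costOfLoop]⟩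
  | succ fuel ih =>
    intro stack vis cost
    cases stack with
    | nil => exact ⟨[], by simp [visitLoop], by simp [costOfLoop]⟩
    | cons node rest =>
      by_cases h : PySem.Set.contains vis node = true
      · obtain ⟨Δ, hv, hc⟩ := ih rest vis cost
        refine ⟨Δ, ?_, ?_⟩
        · rw [visitLoop, if_neg (by simpa using h)]; exact hv
        · rw [costOfLoop, if_pos h]; exact hc
      · obtain ⟨Δ, hv, hc⟩ := ih
          (((List.lookup node edgesMap).getD []).foldl (fun st e => e.1 :: st) rest)
          (PySem.Set.add vis node) (nodeCost edgesMap cost node)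
        have hadd : PySem.Set.add vis node = vis ++ [node] := by
          rw [PySem.Set.add, if_neg h]
        rw [hadd] at hv hc
        refine ⟨node :: Δ, ?_, ?_⟩
        · rw [visitLoop, if_pos (by simpa using h), hadd, hv, List.append_assoc, List.singleton_append]
        · rw [costOfLoop, if_neg h, costOfInner_eq, hadd]
          show costOfLoop edgesMap fuel
              (List.foldl (fun st e => e.1 :: st) rest ((List.lookup node edgesMap).getD []))
              (vis ++ [node])
              (List.foldl (fun c e => PySem.Int.band c e.2) cost ((List.lookup node edgesMap).getD [])) =
            (List.foldl (nodeCost edgesMap) cost (node :: Δ), vis ++ node :: Δ)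
          rw [show List.foldl (fun c e => PySem.Int.band c e.2) cost ((List.lookup node edgesMap).getD [])
                = nodeCost edgesMap cost node from rfl,
              hc, List.append_assoc, List.singleton_append, List.foldl_cons]

-- ===== VERDICT (by name: the statement is the Claim_ definition above) =====
theorem costOf_spec : Claim_equal_costOf := by
  intro s edgesMap _
  unfold Spec_costOf costOf costOf_alt
  obtain ⟨Δ, hv, hc⟩ := loop_eq edgesMap
    (1 + edgesMap.foldl (fun a p => a + p.2.length) 0) [s] PySem.Set.empty (-1)
  simp only [PySem.Set.empty, List.nil_append] at hv hc
  simp [hv, hc, PySem.Set.empty]
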